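-- pv_equiv track=rewrite | github.com/nevhn/get-gpu-drivers | amd_driver.py | parse_product_series
-- ===== SOURCE A (Python) =====
-- def parse_product_series(gpu_info_arr):
--     filtered = []
--     for element in gpu_info_arr[1: len(gpu_info_arr)]:
--         if element[1].isnumeric():
--             series = "{}{}000".format(element[0], element[1])
--             filtered.append(series)
--             break
--         filtered.append(element)
--     return filtered
-- ===== SOURCE B (Python) =====
-- def parse_product_series(gpu_info_arr):
--     tail = gpu_info_arr[1:]
--     n = 0
--     while n < len(tail) and not tail[n][1].isnumeric():
--         n += 1
--     result = tail[:n]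
--     if n < len(tail):
--         result.append(tail[n][:2] + "000")
--     return result
-- ===== Notes on version B (the rewrite author's own statement) =====
-- stated objective: alternative
-- what changed: B replaces A's append-as-you-go accumulator loop with two stages: a counting scan that finds the index of the first element whose second character is numeric, then a slice tail[:n] plus a one-off boundary append of tail[n][:2]+'000'.
import Mathlib
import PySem

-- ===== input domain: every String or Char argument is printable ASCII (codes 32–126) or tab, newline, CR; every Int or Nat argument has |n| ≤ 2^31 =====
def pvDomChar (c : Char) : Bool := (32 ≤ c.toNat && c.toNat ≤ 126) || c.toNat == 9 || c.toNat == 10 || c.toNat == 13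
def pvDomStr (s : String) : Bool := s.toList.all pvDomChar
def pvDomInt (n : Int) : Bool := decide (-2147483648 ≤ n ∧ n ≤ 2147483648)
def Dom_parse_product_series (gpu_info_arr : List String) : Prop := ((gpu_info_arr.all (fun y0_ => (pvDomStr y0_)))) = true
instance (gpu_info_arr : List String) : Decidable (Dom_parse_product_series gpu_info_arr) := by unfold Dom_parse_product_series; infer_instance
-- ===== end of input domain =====

-- B: two-stage counting scan (index of first numeric-2nd-char element) + slice + one-off boundary append, instead of A's append-as-you-go accumulator loop; same O(n) cost.


-- ===== PORT A =====
-- "{}{}000".format(element[0], element[1]) given element[1] = c1; element[0] via pyGet?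
-- (the none branch is unreachable: element[1] exists ⇒ element[0] exists)
def pvFmt (e : String) (c1 : Char) : String :=
  match PySem.Str.pyGet? e 0 with
  | some c0 => String.ofList [c0, c1, '0', '0', '0']
  | none => ""

-- element[1].isnumeric(): s[1] is a single ASCII char here, where isnumeric = isdigit (exact on ASCII)
def pvLoopA : List String → List String
  | [] => []
  | e :: rest =>
    match PySem.Str.pyGet? e 1 with
    | none => []                                   -- IndexError (outside Pre_)
    | some c =>
      if PySem.Chars.isdigit c then [pvFmt e c]    -- append series; break
      else e :: pvLoopA rest                       -- filtered.append(element)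

def parse_product_series (gpu_info_arr : List String) : List String :=
  pvLoopA (PySem.List.slice gpu_info_arr (some 1) (some (gpu_info_arr.length : Int)))

-- ===== PORT B =====
-- the while loop: count how many leading elements fail the test (none = IndexError during the scan)
def pvScanB : List String → Option Nat
  | [] => some 0
  | e :: rest =>
    match PySem.Str.pyGet? e 1 with
    | none => none                                 -- IndexError (outside Pre_)
    | some c =>
      if PySem.Chars.isdigit c then some 0
      else (pvScanB rest).map (· + 1)

def parse_product_series_alt (gpu_info_arr : List String) : List String :=
  let tail := PySem.List.slice gpu_info_arr (some 1) none
  match pvScanB tail with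
  | none => []                                     -- IndexError (outside Pre_)
  | some n =>
    let res := PySem.List.slice tail none (some (n : Int))   -- tail[:n]
    if n < tail.length then
      match PySem.List.pyGet? tail (n : Int) with
      | some e => res ++ [String.ofList ((PySem.Chars.slice e.toList none (some 2)) ++ ['0', '0', '0'])]  -- tail[n][:2] + "000"
      | none => res
    else res

-- ===== PRECONDITION & SPEC =====
-- pvHit s : element[1] exists and is a digit (the loop's break condition)
def pvHit (s : String) : Bool :=
  match PySem.Str.pyGet? s 1 with
  | some c => PySem.Chars.isdigit c
  | none => false

-- A raises IndexError iff some element of the tail scanned before the first break-element has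
-- length < 2; Pre_ admits exactly the inputs where A returns normally.
def Pre_parse_product_series (gpu_info_arr : List String) : Prop :=
  (((gpu_info_arr.drop 1).takeWhile (fun s => !pvHit s)).all
      (fun s => 2 ≤ s.toList.length)) = true
instance (gpu_info_arr : List String) : Decidable (Pre_parse_product_series gpu_info_arr) := by
  unfold Pre_parse_product_series; infer_instance

def pvWitness_parse_product_series : List String := ["header", "Radeon RX", "R9 Fury"]

def Spec_parse_product_series (gpu_info_arr : List String) (out : List String) : Prop := out = parse_product_series_alt gpu_info_arr
instance (gpu_info_arr : List String) (out : List String) : Decidable (Spec_parse_product_series gpu_info_arr out) := by unfold Spec_parse_product_series; infer_instance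

-- ===== CLAIM (what is proved, stated in full; the proofs are below) =====
def Claim_equal_parse_product_series : Prop := ∀ (gpu_info_arr : List String), Dom_parse_product_series gpu_info_arr → Pre_parse_product_series gpu_info_arr → Spec_parse_product_series gpu_info_arr (parse_product_series gpu_info_arr)

-- ===== LEMMAS AND PROOFS =====

-- proof helper: B's post-scan stage on list l with scan result n (the body of the `some` branch)
def pvB (l : List String) (n : Nat) : List String :=
  let res := PySem.List.slice l none (some (n : Int))
  if n < l.length then
    match PySem.List.pyGet? l (n : Int) with
    | some e => res ++ [String.ofList ((PySem.Chars.slice e.toList none (some 2)) ++ ['0', '0', '0'])]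
    | none => res
  else res

theorem pvB_cons (e : String) (rest : List String) (m : Nat) :
    pvB (e :: rest) (m + 1) = e :: pvB rest m := by
  unfold pvB
  rw [PySem.List.slice_to_natCast, PySem.List.slice_to_natCast,
    show ((m + 1 : Nat) : Int) = (m : Int) + 1 by push_cast; ring,
    PySem.List.pyGet?_cons_succ]
  by_cases h : m < rest.length
  · rw [if_pos (by simp only [List.length_cons]; omega), if_pos h]
    cases PySem.List.pyGet? rest (m : Int) <;> rfl
  · rw [if_neg (by simp only [List.length_cons]; omega), if_neg h]
    rfl

-- the scan succeeds under Pre_, and its post-scan stage equals A's loop result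
theorem pv_key : ∀ (l : List String),
    ((l.takeWhile (fun s => !pvHit s)).all (fun s => 2 ≤ s.toList.length)) = true →
    ∃ n, pvScanB l = some n ∧ pvB l n = pvLoopA l := by
  intro l
  induction l with
  | nil =>
    intro _
    exact ⟨0, rfl, rfl⟩
  | cons e rest ih =>
    intro hpre
    cases hg : PySem.Chars.pyGet? e.toList 1 with
    | none =>
      have hg' : PySem.List.pyGet? e.toList 1 = none := hg
      have hhit : pvHit e = false := by simp [pvHit, PySem.Str.pyGet?, hg']
      rw [List.takeWhile_cons, hhit] at hpre
      simp at hpre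
      obtain ⟨h2, -⟩ := hpre
      have h1 : 1 < e.toList.length := by simpa using h2
      have hsome := PySem.List.pyGet?_ofNat (xs := e.toList) (n := 1) h1
      norm_num at hsome
      rw [hg'] at hsome
      exact absurd hsome (by simp)
    | some c =>
      have hg' : PySem.List.pyGet? e.toList 1 = some c := hg
      by_cases hd : PySem.Chars.isdigit c = true
      · refine ⟨0, ?_, ?_⟩
        · simp only [pvScanB, PySem.Str.pyGet?, hg, if_pos hd]
        · -- e.toList has at least 2 chars: e[1] exists
          match he : e.toList with
          | [] => rw [he] at hg'; simp [PySem.List.pyGet?, PySem.List.pyIdx?] at hg'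
          | [a] => rw [he] at hg'; simp [PySem.List.pyGet?, PySem.List.pyIdx?] at hg'
          | a :: b :: t =>
            have hb : b = c := by
              rw [he] at hg'
              simp [PySem.List.pyGet?, PySem.List.pyIdx?] at hg'
              exact hg'
            have h0 : PySem.List.pyGet? e.toList 0 = some a := by
              rw [he, PySem.List.pyGet?_zero_cons]
            have hLB : pvB (e :: rest) 0 =
                [String.ofList ((PySem.List.slice e.toList none (some 2)) ++ ['0', '0', '0'])] := by
              unfold pvB
              simp [PySem.List.slice_to _ (le_refl 0)]
            have hsl : PySem.List.slice e.toList none (some 2) = [a, b] := by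
              rw [he, PySem.List.slice_to _ (show (0:Int) ≤ 2 by norm_num)]
              rfl
            rw [hLB, hsl]
            simp only [pvLoopA, PySem.Str.pyGet?, hg, if_pos hd, pvFmt,
              PySem.Chars.pyGet?_eq_listPyGet?, h0]
            simp [hb]
      · have hhit : pvHit e = false := by simp [pvHit, PySem.Str.pyGet?, hg', hd]
        rw [List.takeWhile_cons, hhit] at hpre
        simp at hpre
        obtain ⟨-, hpre2⟩ := hpre
        obtain ⟨m, hscan, hB⟩ := ih (by simpa using hpre2)
        refine ⟨m + 1, ?_, ?_⟩
        · simp only [pvScanB, PySem.Str.pyGet?, hg, if_neg hd, hscan, Option.map_some]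
        · rw [pvB_cons, hB]
          simp only [pvLoopA, PySem.Str.pyGet?, hg, if_neg hd]

-- ===== VERDICT (by name: the statement is the Claim_ definition above) =====
theorem parse_product_series_spec : Claim_equal_parse_product_series := by
  intro xs _ hpre
  unfold Spec_parse_product_series parse_product_series
  have hsliceA : PySem.List.slice xs (some 1) (some (xs.length : Int)) = xs.drop 1 := by
    rw [PySem.List.slice_toNat xs (by norm_num) (by positivity)]
    simp only [Int.toNat_one, Int.toNat_natCast]
    exact List.take_of_length_le (by simp)
  have hsliceB : PySem.List.slice xs (some 1) none = xs.drop 1 := by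
    have := PySem.List.slice_from_natCast (xs := xs) (a := 1)
    simpa using this
  obtain ⟨n, hscan, hB⟩ := pv_key (xs.drop 1) hpre
  have halt : parse_product_series_alt xs =
      match pvScanB (xs.drop 1) with
      | none => []
      | some n => pvB (xs.drop 1) n := by
    unfold parse_product_series_alt pvB
    rw [hsliceB]
  rw [halt, hscan, hsliceA]
  exact hB.symm
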